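-- pv_equiv track=rewrite | github.com/JuniorDLR/Guia8-Python | ejercicio12.py | resumen_laboratorio
-- ===== SOURCE A (Python) =====
-- def resumen_laboratorio(laboratorio):
--     """Calcula el resumen de ocupadas y libres"""
--     ocupadas = 0
--     libres = 0
--     for fila in laboratorio:
--         for computadora in fila:
--             if computadora == 1:
--                 ocupadas += 1
--             else:
--                 libres += 1
--     return ocupadas, libres
-- ===== SOURCE B (Python) =====
-- def resumen_laboratorio(laboratorio):
--     """Calcula el resumen de ocupadas y libres"""
--     celdas = [c for fila in laboratorio for c in fila]
--
--     def conteo(lo, hi):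
--         # occupied cells among celdas[lo:hi], by divide and conquer
--         if hi - lo == 0:
--             return 0
--         if hi - lo == 1:
--             return 1 if celdas[lo] == 1 else 0
--         mid = (lo + hi) // 2
--         return conteo(lo, mid) + conteo(mid, hi)
--
--     ocupadas = conteo(0, len(celdas))
--     return ocupadas, len(celdas) - ocupadas
-- ===== Notes on version B (the rewrite author's own statement) =====
-- stated objective: alternative
-- what changed: Flattens the grid once and counts occupied cells by divide-and-conquer recursion on index intervals, deriving free cells as total minus occupied, instead of two nested loops with a per-cell if/else and two accumulators.
import Mathlib
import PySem

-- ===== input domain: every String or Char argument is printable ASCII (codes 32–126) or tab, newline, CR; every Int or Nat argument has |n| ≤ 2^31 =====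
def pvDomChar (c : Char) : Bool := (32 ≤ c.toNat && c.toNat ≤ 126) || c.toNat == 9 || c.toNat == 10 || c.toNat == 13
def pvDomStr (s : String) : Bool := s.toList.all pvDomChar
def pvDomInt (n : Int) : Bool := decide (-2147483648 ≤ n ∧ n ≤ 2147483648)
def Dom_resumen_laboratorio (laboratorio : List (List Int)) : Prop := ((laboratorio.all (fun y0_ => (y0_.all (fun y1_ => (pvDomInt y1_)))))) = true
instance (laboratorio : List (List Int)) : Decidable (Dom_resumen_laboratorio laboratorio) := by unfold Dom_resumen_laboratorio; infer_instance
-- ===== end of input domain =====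

-- B flattens the grid and counts occupied cells by divide-and-conquer on index intervals,
-- deriving the free count as total − occupied (alternative algorithm, same cost).

-- ===== PORT A =====
-- nested loops with two accumulators (ocupadas, libres) and a per-cell if/else
def resumen_laboratorio (laboratorio : List (List Int)) : Int × Int :=
  laboratorio.foldl
    (fun (acc : Int × Int) fila =>
      fila.foldl
        (fun (acc : Int × Int) computadora =>
          if computadora == 1 then (acc.1 + 1, acc.2) else (acc.1, acc.2 + 1))
        acc)
    (0, 0)

-- ===== PORT B =====
-- conteo(lo, hi): occupied cells among celdas[lo:hi], by divide and conquer.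
-- celdas[lo] is ported as getD lo 0: every reachable call has lo < celdas.length, where getD is exact.
def conteoB (celdas : List Int) (lo hi : Nat) : Int :=
  if hi - lo = 0 then 0
  else if hi - lo = 1 then (if celdas.getD lo 0 == 1 then 1 else 0)
  else
    let mid := (lo + hi) / 2
    conteoB celdas lo mid + conteoB celdas mid hi
termination_by hi - lo
decreasing_by all_goals omega

def resumen_laboratorio_alt (laboratorio : List (List Int)) : Int × Int :=
  let celdas := laboratorio.flatten
  let ocupadas := conteoB celdas 0 celdas.length
  (ocupadas, (celdas.length : Int) - ocupadas)

-- ===== PRECONDITION & SPEC =====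
def Spec_resumen_laboratorio (laboratorio : List (List Int)) (out : Int × Int) : Prop := out = resumen_laboratorio_alt laboratorio
instance (laboratorio : List (List Int)) (out : Int × Int) : Decidable (Spec_resumen_laboratorio laboratorio out) := by unfold Spec_resumen_laboratorio; infer_instance

-- ===== CLAIM (what is proved, stated in full; the proofs are below) =====
def Claim_equal_resumen_laboratorio : Prop := ∀ (laboratorio : List (List Int)), Dom_resumen_laboratorio laboratorio → Spec_resumen_laboratorio laboratorio (resumen_laboratorio laboratorio)

-- ===== LEMMAS AND PROOFS =====

-- conteoB sums the per-index indicator over [lo, hi)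
theorem conteoB_eq_sum (celdas : List Int) (lo hi : Nat) :
    conteoB celdas lo hi
    = ((List.range' lo (hi - lo)).map
        (fun i => if celdas.getD i 0 == 1 then (1 : Int) else 0)).sum := by
  induction lo, hi using conteoB.induct celdas with
  | case1 lo hi h => rw [conteoB]; simp [h]
  | case2 lo hi h0 h1 hc => rw [conteoB]; simp [h0, h1, hc]
  | case3 lo hi h0 h1 hc => rw [conteoB]; simp [h0, h1, hc]
  | case4 lo hi h0 h1 mid ih1 ih2 =>
    rw [conteoB]
    simp only [h0, h1, reduceIte]
    rw [ih1, ih2]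
    have : List.range' lo (hi - lo)
        = List.range' lo ((lo + hi) / 2 - lo) ++ List.range' ((lo + hi) / 2) (hi - (lo + hi) / 2) := by
      have := List.range'_append (s:=lo) (m:=(lo + hi) / 2 - lo) (n:=hi - (lo + hi) / 2) (step:=1)
      simp only [one_mul, Nat.one_mul, mul_one] at this
      rw [show lo + ((lo + hi) / 2 - lo) = (lo + hi) / 2 by omega] at this
      rw [show ((lo + hi) / 2 - lo) + (hi - (lo + hi) / 2) = hi - lo by omega] at this
      exact this.symm
    rw [this, List.map_append, List.sum_append]

-- the indicator sum over all indices is the count of 1s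
theorem sum_indicator_eq_count (l : List Int) :
    ((List.range' 0 l.length).map
        (fun i => if l.getD i 0 == 1 then (1 : Int) else 0)).sum
    = (l.count 1 : Int) := by
  induction l with
  | nil => simp
  | cons x xs ih =>
    have hr : List.range' 0 (xs.length + 1) = 0 :: List.range' 1 xs.length := by
      rw [List.range'_succ]
    have hshift : List.range' 1 xs.length = (List.range' 0 xs.length).map (· + 1) := by
      rw [List.range'_eq_map_range, List.range'_eq_map_range]
      simp [List.map_map, Function.comp_def, Nat.add_comm]
    simp only [List.length_cons, hr, List.map_cons, List.sum_cons, hshift, List.map_map]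
    have : ((List.range' 0 xs.length).map
        (fun i => if (x :: xs).getD (i + 1) 0 == 1 then (1 : Int) else 0)).sum
        = ((List.range' 0 xs.length).map
        (fun i => if xs.getD i 0 == 1 then (1 : Int) else 0)).sum := by
      simp [List.getD_cons_succ]
    simp only [Function.comp_def, List.getD_cons_succ] at *
    rw [ih]
    by_cases hx : x = 1 <;> simp [hx, List.count_cons, Prod.ext_iff] <;> push_cast <;> omega

-- A's nested fold computes (count of 1s, total − count) over the flattened grid
theorem resumen_row_foldl (fila : List Int) (o l : Int) :
    fila.foldl
      (fun (acc : Int × Int) computadora =>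
        if computadora == 1 then (acc.1 + 1, acc.2) else (acc.1, acc.2 + 1))
      (o, l)
    = (o + (fila.count 1 : Int), l + ((fila.length : Int) - (fila.count 1 : Int))) := by
  induction fila generalizing o l with
  | nil => simp
  | cons x xs ih =>
    simp only [List.foldl_cons]
    by_cases hx : x = 1
    · rw [if_pos (by simp [hx] : (x == 1) = true), ih]
      simp [hx, List.count_cons, Prod.ext_iff]
      push_cast; omega
    · rw [if_neg (by simp [hx] : ¬ ((x == 1) = true)), ih]
      simp [List.count_cons, hx, Prod.ext_iff]
      push_cast; omega

theorem resumen_foldl_eq (laboratorio : List (List Int)) (o l : Int) :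
    laboratorio.foldl
      (fun (acc : Int × Int) fila =>
        fila.foldl
          (fun (acc : Int × Int) computadora =>
            if computadora == 1 then (acc.1 + 1, acc.2) else (acc.1, acc.2 + 1))
          acc)
      (o, l)
    = (o + (laboratorio.flatten.count 1 : Int),
       l + ((laboratorio.flatten.length : Int) - (laboratorio.flatten.count 1 : Int))) := by
  induction laboratorio generalizing o l with
  | nil => simp
  | cons f fs ih =>
    simp only [List.foldl_cons, resumen_row_foldl, ih, List.flatten_cons,
      List.count_append, List.length_append]
    simp [Prod.ext_iff]; constructor <;> push_cast <;> ring

-- ===== VERDICT (by name: the statement is the Claim_ definition above) =====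
theorem resumen_laboratorio_spec : Claim_equal_resumen_laboratorio := by
  intro lab _
  unfold Spec_resumen_laboratorio resumen_laboratorio resumen_laboratorio_alt
  rw [resumen_foldl_eq]
  simp only []
  rw [conteoB_eq_sum, Nat.sub_zero, sum_indicator_eq_count]
  simp
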